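-- pv_equiv track=rewrite | github.com/Potterhead007/aether-band-engine | src/aether/voice/arrangement/harmony.py | _get_chord_tone_above
-- ===== SOURCE A (Python) =====
-- from typing import Dict, List, Optional, Tuple
--
-- def _get_chord_tone_above(
--
--     melody_pitch: int,
--     chord: List[int],
-- ) -> int:
--     """Get nearest chord tone above melody."""
--     melody_pc = melody_pitch % 12
--     melody_octave = melody_pitch // 12
--
--     # Find chord tones above
--     for offset in range(1, 13):
--         candidate_pc = (melody_pc + offset) % 12
--         if candidate_pc in chord:
--             return melody_pitch + offset
--
--     return melody_pitch + 4  # Default to major third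
-- ===== SOURCE B (Python) =====
-- def _get_chord_tone_above(melody_pitch, chord):
--     """Get nearest chord tone above melody."""
--     melody_pc = melody_pitch % 12
--     offsets = [(c - melody_pc - 1) % 12 + 1 for c in chord if 0 <= c <= 11]
--     return melody_pitch + (min(offsets) if offsets else 4)
-- ===== Notes on version B (the rewrite author's own statement) =====
-- stated objective: alternative
-- what changed: Replaces A's linear scan of offsets 1..12 with a first membership test at each step by a direct minimum over the ascending distances ((c - melody_pc - 1) % 12) + 1 of the in-range (0..11) chord tones, defaulting to +4 when none exist.
import Mathlib
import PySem

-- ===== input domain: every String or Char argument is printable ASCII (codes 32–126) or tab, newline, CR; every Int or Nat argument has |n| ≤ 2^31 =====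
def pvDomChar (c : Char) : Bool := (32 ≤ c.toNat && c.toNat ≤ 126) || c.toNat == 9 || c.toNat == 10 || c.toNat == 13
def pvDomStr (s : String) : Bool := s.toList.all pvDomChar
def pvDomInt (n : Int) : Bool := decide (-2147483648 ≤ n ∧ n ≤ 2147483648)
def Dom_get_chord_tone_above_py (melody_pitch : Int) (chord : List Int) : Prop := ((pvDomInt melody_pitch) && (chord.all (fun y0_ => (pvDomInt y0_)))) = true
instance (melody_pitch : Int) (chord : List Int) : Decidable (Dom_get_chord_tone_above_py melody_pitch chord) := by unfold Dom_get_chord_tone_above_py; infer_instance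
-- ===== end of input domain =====

-- B replaces A's scan over the 12 candidate offsets by a direct minimum over the
-- chord tones' ascending distances (objective: alternative decomposition, same cost).

-- ===== PORT A =====
-- literal port: for offset in range(1,13): if (melody_pc+offset)%12 in chord: return melody_pitch+offset
def get_chord_tone_above_py (melody_pitch : Int) (chord : List Int) : Int :=
  let melody_pc := PySem.Int.mod melody_pitch 12
  let _melody_octave := PySem.Int.floordiv melody_pitch 12
  match (PySem.List.pyRange 1 13 1).findSome?
      (fun offset => if PySem.Int.mod (melody_pc + offset) 12 ∈ chord
                     then some (melody_pitch + offset) else none) with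
  | some r => r
  | none => melody_pitch + 4

-- ===== PORT B =====
def get_chord_tone_above_py_alt (melody_pitch : Int) (chord : List Int) : Int :=
  let melody_pc := PySem.Int.mod melody_pitch 12
  let offsets := (chord.filter (fun c => 0 ≤ c && c ≤ 11)).map
      (fun c => PySem.Int.mod (c - melody_pc - 1) 12 + 1)
  match PySem.List.min? offsets (fun y => y) with
  | some m => melody_pitch + m
  | none => melody_pitch + 4

-- ===== PRECONDITION & SPEC =====
def Spec_get_chord_tone_above_py (melody_pitch : Int) (chord : List Int) (out : Int) : Prop := out = get_chord_tone_above_py_alt melody_pitch chord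
instance (melody_pitch : Int) (chord : List Int) (out : Int) : Decidable (Spec_get_chord_tone_above_py melody_pitch chord out) := by unfold Spec_get_chord_tone_above_py; infer_instance

-- ===== CLAIM (what is proved, stated in full; the proofs are below) =====
def Claim_equal_get_chord_tone_above_py : Prop := ∀ (melody_pitch : Int) (chord : List Int), Dom_get_chord_tone_above_py melody_pitch chord → Spec_get_chord_tone_above_py melody_pitch chord (get_chord_tone_above_py melody_pitch chord)

-- ===== LEMMAS AND PROOFS =====

-- A's early-return scan over a strictly increasing list: either nothing matches
-- (result none), or the result is g of the least matching element.
theorem pv_findSome?_ite_sorted (g : Int → Int) (P : Int → Prop) [DecidablePred P]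
    (l : List Int) (hs : l.Pairwise (· < ·)) :
    (l.findSome? (fun o => if P o then some (g o) else none) = none ∧ ∀ x ∈ l, ¬ P x) ∨
    (∃ m, m ∈ l ∧ P m ∧ (∀ x ∈ l, P x → m ≤ x) ∧
      l.findSome? (fun o => if P o then some (g o) else none) = some (g m)) := by
  induction l with
  | nil => left; simp
  | cons h t ih =>
    rw [List.pairwise_cons] at hs
    by_cases hP : P h
    · right
      refine ⟨h, List.mem_cons_self, hP, ?_, by simp [hP]⟩
      intro x hx _
      rcases List.mem_cons.1 hx with rfl | hx
      · exact le_refl _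
      · exact le_of_lt (hs.1 x hx)
    · rcases ih hs.2 with ⟨hnone, hall⟩ | ⟨m, hm, hPm, hmin, hres⟩
      · left
        refine ⟨by simp [hP, hnone], ?_⟩
        intro x hx
        rcases List.mem_cons.1 hx with rfl | hx
        · exact hP
        · exact hall x hx
      · right
        refine ⟨m, List.mem_cons_of_mem _ hm, hPm, ?_, by simp [hP, hres]⟩
        intro x hx hPx
        rcases List.mem_cons.1 hx with rfl | hx
        · exact absurd hPx hP
        · exact hmin x hx hPx

-- membership in B's offsets list, in terms of A's matching condition
theorem pv_mem_offsets (mpc : Int) (chord : List Int) (_hlo : 0 ≤ mpc) (_hhi : mpc < 12)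
    (o : Int) :
    o ∈ (chord.filter (fun c => 0 ≤ c && c ≤ 11)).map (fun c => (c - mpc - 1) % 12 + 1) ↔
      (1 ≤ o ∧ o ≤ 12 ∧ (mpc + o) % 12 ∈ chord) := by
  simp only [List.mem_map, List.mem_filter, Bool.and_eq_true, decide_eq_true_eq]
  constructor
  · rintro ⟨c, ⟨hc, hc0, hc11⟩, rfl⟩
    refine ⟨by omega, by omega, ?_⟩
    have : (mpc + ((c - mpc - 1) % 12 + 1)) % 12 = c := by omega
    rwa [this]
  · rintro ⟨h1, h12, hmem⟩
    refine ⟨(mpc + o) % 12, ⟨hmem, by omega, by omega⟩, by omega⟩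

-- ===== VERDICT (by name: the statement is the Claim_ definition above) =====
theorem get_chord_tone_above_py_spec : Claim_equal_get_chord_tone_above_py := by
  intro melody_pitch chord _
  unfold Spec_get_chord_tone_above_py get_chord_tone_above_py get_chord_tone_above_py_alt
  rw [PySem.Int.mod_eq_emod_of_pos (by norm_num : (0:Int) < 12)]
  set mpc := melody_pitch % 12 with hmpc
  have hlo : 0 ≤ mpc := Int.emod_nonneg _ (by norm_num)
  have hhi : mpc < 12 := Int.emod_lt_of_pos _ (by norm_num)
  have hmodeq : ∀ a : Int, PySem.Int.mod a 12 = a % 12 := fun a =>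
    PySem.Int.mod_eq_emod_of_pos (by norm_num)
  simp only [hmodeq]
  have hsorted : (PySem.List.pyRange 1 13 1).Pairwise (· < ·) :=
    PySem.List.pairwise_lt_pyRange_one 1 13
  rcases pv_findSome?_ite_sorted (fun o => melody_pitch + o)
      (fun o => (mpc + o) % 12 ∈ chord) (PySem.List.pyRange 1 13 1) hsorted with
    ⟨hnone, hall⟩ | ⟨m, hm, hPm, hmin, hres⟩
  · rw [hnone]
    -- offsets is empty: any member would give a matching offset in [1,12]
    have hoff : (chord.filter (fun c => 0 ≤ c && c ≤ 11)).map (fun c => (c - mpc - 1) % 12 + 1) = [] := by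
      rw [List.eq_nil_iff_forall_not_mem]
      intro o ho
      obtain ⟨h1, h12, hmem⟩ := (pv_mem_offsets mpc chord hlo hhi o).1 ho
      exact hall o ((PySem.List.mem_pyRange_one).2 ⟨h1, by omega⟩) hmem
    rw [hoff]
    simp [PySem.List.min?]
  · rw [hres]
    have hm' := (PySem.List.mem_pyRange_one).1 hm
    -- m is in offsets, and is its minimum
    have hmoff : m ∈ (chord.filter (fun c => 0 ≤ c && c ≤ 11)).map (fun c => (c - mpc - 1) % 12 + 1) :=
      (pv_mem_offsets mpc chord hlo hhi m).2 ⟨by omega, by omega, hPm⟩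
    have hne : (chord.filter (fun c => 0 ≤ c && c ≤ 11)).map (fun c => (c - mpc - 1) % 12 + 1) ≠ [] :=
      fun h => by simp [h] at hmoff
    rcases hopt : PySem.List.min? ((chord.filter (fun c => 0 ≤ c && c ≤ 11)).map (fun c => (c - mpc - 1) % 12 + 1)) (fun y => y) with _ | m'
    · exact absurd ((PySem.List.min?_eq_none_iff _ _).1 hopt) hne
    · have hm'mem := PySem.List.min?_mem hopt
      obtain ⟨h1, h12, hmem⟩ := (pv_mem_offsets mpc chord hlo hhi m').1 hm'mem
      have hle1 : m' ≤ m := PySem.List.min?_isMin hopt m hmoff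
      have hle2 : m ≤ m' :=
        hmin m' ((PySem.List.mem_pyRange_one).2 ⟨h1, by omega⟩) hmem
      have : m = m' := le_antisymm hle2 hle1
      simp [this]
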